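-- pv_equiv track=rewrite | github.com/Cubanso24/Zeus | src/evaluation/metrics.py | is_syntactically_valid
-- ===== SOURCE A (Python) =====
-- def is_syntactically_valid(query: str) -> bool:
--     """
--     Basic syntax validation for Splunk queries.
--
--     Args:
--         query: Splunk query to validate
--
--     Returns:
--         True if query appears syntactically valid
--     """
--     query = query.strip().lower()
--
--     # Skip clarification requests
--     if query.startswith("clarification:"):
--         return True
--
--     # Check if starts with valid search
--     valid_starts = ['index=', 'search ', '|', 'eventtype=', 'sourcetype=', 'source=', 'host=']
--     if not any(query.startswith(start) for start in valid_starts):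
--         return False
--
--     # Check for balanced quotes
--     single_quotes = query.count("'") - query.count("\\'")
--     double_quotes = query.count('"') - query.count('\\"')
--
--     if single_quotes % 2 != 0 or double_quotes % 2 != 0:
--         return False
--
--     # Check for balanced parentheses
--     paren_balance = query.count('(') - query.count(')')
--     if paren_balance != 0:
--         return False
--
--     return True
-- ===== SOURCE B (Python) =====
-- def is_syntactically_valid(query: str) -> bool:
--     """
--     Basic syntax validation for Splunk queries, checked in a single pass.
--     """
--     query = query.strip().lower()
--
--     if query.startswith("clarification:"):
--         return True
--
--     valid_starts = ['index=', 'search ', '|', 'eventtype=', 'sourcetype=', 'source=', 'host=']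
--     if not any(query.startswith(start) for start in valid_starts):
--         return False
--
--     single_quotes = 0
--     double_quotes = 0
--     paren_balance = 0
--     prev_backslash = False
--     for ch in query:
--         if ch == "'" and not prev_backslash:
--             single_quotes += 1
--         elif ch == '"' and not prev_backslash:
--             double_quotes += 1
--         elif ch == '(':
--             paren_balance += 1
--         elif ch == ')':
--             paren_balance -= 1
--         prev_backslash = ch == '\\'
--
--     return single_quotes % 2 == 0 and double_quotes % 2 == 0 and paren_balance == 0
-- ===== Notes on version B (the rewrite author's own statement) =====
-- stated objective: alternative
-- what changed: Replaces A's six full-string count() passes (quote counts, escaped-quote counts, and both parenthesis counts) with a single character-by-character pass that keeps both quote tallies (skipping quotes preceded by a backslash) and a running parenthesis balance.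
import Mathlib
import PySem

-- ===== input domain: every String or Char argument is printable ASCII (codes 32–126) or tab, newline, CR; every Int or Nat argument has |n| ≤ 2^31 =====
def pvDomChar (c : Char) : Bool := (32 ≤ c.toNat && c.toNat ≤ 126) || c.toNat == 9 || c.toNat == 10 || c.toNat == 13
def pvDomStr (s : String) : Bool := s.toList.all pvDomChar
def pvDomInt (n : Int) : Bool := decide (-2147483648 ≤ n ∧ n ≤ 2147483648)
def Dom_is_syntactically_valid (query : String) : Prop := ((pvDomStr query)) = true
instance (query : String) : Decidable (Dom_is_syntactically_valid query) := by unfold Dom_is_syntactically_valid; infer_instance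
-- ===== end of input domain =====

-- B fuses A's six full-string count() passes into one char-by-char pass keeping quote tallies
-- (skipping backslash-escaped quotes) and a running parenthesis balance; objective: alternative.

-- ===== PORT A =====
def validStarts : List String :=
  ["index=", "search ", "|", "eventtype=", "sourcetype=", "source=", "host="]

def is_syntactically_valid (query : String) : Bool :=
  let q := PySem.Str.lower (PySem.Str.strip query)
  if PySem.Str.startswith q "clarification:" then true
  else if !(validStarts.any (fun start => PySem.Str.startswith q start)) then false
  else
    let singleQuotes : Int := (PySem.Str.count q "'" : Int) - (PySem.Str.count q "\\'" : Int)
    let doubleQuotes : Int := (PySem.Str.count q "\"" : Int) - (PySem.Str.count q "\\\"" : Int)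
    if PySem.Int.mod singleQuotes 2 ≠ 0 ∨ PySem.Int.mod doubleQuotes 2 ≠ 0 then false
    else
      let parenBalance : Int := (PySem.Str.count q "(" : Int) - (PySem.Str.count q ")" : Int)
      if parenBalance ≠ 0 then false
      else true

-- ===== PORT B =====
-- single pass: (single_quotes, double_quotes, paren_balance) with a prev_backslash flag
def altLoop : List Char → Int → Int → Int → Bool → Int × Int × Int
  | [], sq, dq, pb, _ => (sq, dq, pb)
  | c :: rest, sq, dq, pb, prev =>
    if c == '\'' && !prev then altLoop rest (sq + 1) dq pb (c == '\\')
    else if c == '"' && !prev then altLoop rest sq (dq + 1) pb (c == '\\')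
    else if c == '(' then altLoop rest sq dq (pb + 1) (c == '\\')
    else if c == ')' then altLoop rest sq dq (pb - 1) (c == '\\')
    else altLoop rest sq dq pb (c == '\\')

def is_syntactically_valid_alt (query : String) : Bool :=
  let q := PySem.Str.lower (PySem.Str.strip query)
  if PySem.Str.startswith q "clarification:" then true
  else if !(validStarts.any (fun start => PySem.Str.startswith q start)) then false
  else
    let res := altLoop q.toList 0 0 0 false
    PySem.Int.mod res.1 2 == 0 && PySem.Int.mod res.2.1 2 == 0 && res.2.2 == 0

-- ===== PRECONDITION & SPEC =====
def Spec_is_syntactically_valid (query : String) (out : Bool) : Prop := out = is_syntactically_valid_alt query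
instance (query : String) (out : Bool) : Decidable (Spec_is_syntactically_valid query out) := by unfold Spec_is_syntactically_valid; infer_instance

-- ===== CLAIM (what is proved, stated in full; the proofs are below) =====
def Claim_equal_is_syntactically_valid : Prop := ∀ (query : String), Dom_is_syntactically_valid query → Spec_is_syntactically_valid query (is_syntactically_valid query)

-- ===== LEMMAS AND PROOFS =====

-- number of occurrences of q in cs that are immediately preceded by a backslash
-- (prev says whether the virtual char before cs is a backslash)
def escCount : List Char → Char → Bool → Nat
  | [], _, _ => 0
  | c :: rest, q, prev => (if prev && (c == q) then 1 else 0) + escCount rest q (c == '\\')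

theorem escCount_head_ne {c : Char} {rest : List Char} {q : Char} (h : c ≠ q) (b b' : Bool) :
    escCount (c :: rest) q b = escCount (c :: rest) q b' := by
  simp [escCount, h]

theorem count_go_single (q : Char) :
    ∀ (fuel : Nat) (cs : List Char) (acc : Nat), cs.length ≤ fuel →
      PySem.Chars.count.go [q] fuel cs acc = acc + cs.count q := by
  intro fuel
  induction fuel with
  | zero =>
    intro cs acc h
    have : cs = [] := List.length_eq_zero_iff.mp (Nat.le_zero.mp h)
    subst this
    simp [PySem.Chars.count.go]
  | succ n ih =>
    intro cs acc h
    cases cs with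
    | nil => simp [PySem.Chars.count.go]
    | cons c t =>
      simp only [PySem.Chars.count.go]
      by_cases hc : q = c
      · subst hc
        simp only [List.isPrefixOf, beq_self_eq_true, Bool.true_and, List.isPrefixOf_nil_left,
          if_true]
        rw [show List.drop [q].length (q :: t) = t from rfl]
        rw [ih t (acc + 1) (by simp only [List.length_cons] at h; omega)]
        simp [List.count_cons]
        omega
      · have hpre : [q].isPrefixOf (c :: t) = false := by
          simp only [List.isPrefixOf, List.isPrefixOf_nil_left, Bool.and_true]
          simpa using hc
        simp only [hpre, Bool.false_eq_true, if_false]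
        rw [ih t acc (by simp only [List.length_cons] at h; omega)]
        have hcq : (c == q) = false := by simpa using fun h' => hc h'.symm
        simp [List.count_cons, hcq]

theorem count_go_esc (q : Char) (hq : q ≠ '\\') :
    ∀ (fuel : Nat) (cs : List Char) (acc : Nat), cs.length ≤ fuel →
      PySem.Chars.count.go ['\\', q] fuel cs acc = acc + escCount cs q false := by
  intro fuel
  induction fuel with
  | zero =>
    intro cs acc h
    have : cs = [] := List.length_eq_zero_iff.mp (Nat.le_zero.mp h)
    subst this
    simp [PySem.Chars.count.go, escCount]
  | succ n ih =>
    intro cs acc h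
    cases cs with
    | nil => simp [PySem.Chars.count.go, escCount]
    | cons c t =>
      simp only [PySem.Chars.count.go]
      by_cases hmatch : ['\\', q].isPrefixOf (c :: t) = true
      · -- c = '\\' and t = q :: t'
        cases t with
        | nil => simp [List.isPrefixOf] at hmatch
        | cons d t' =>
          simp only [List.isPrefixOf, Bool.and_eq_true, beq_iff_eq] at hmatch
          obtain ⟨hc, hd, -⟩ := hmatch
          subst hc; subst hd
          simp only [List.isPrefixOf, beq_self_eq_true, Bool.true_and, List.isPrefixOf_nil_left,
            Bool.and_true, if_true]
          rw [show List.drop ['\\', q].length ('\\' :: q :: t') = t' from rfl]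
          rw [ih t' (acc + 1) (by simp only [List.length_cons] at h; omega)]
          have hqb : (q == '\\') = false := by simpa using hq
          simp only [escCount, beq_self_eq_true, Bool.and_true, Bool.false_and, hqb,
            Bool.true_and, if_true, if_false, Bool.false_eq_true]
          omega
      · simp only [Bool.not_eq_true] at hmatch
        simp only [hmatch, Bool.false_eq_true, if_false]
        rw [ih t acc (by simp only [List.length_cons] at h; omega)]
        have heq : escCount (c :: t) q false = escCount t q false := by
          simp only [escCount, Bool.false_and, Bool.false_eq_true, if_false, Nat.zero_add]
          by_cases hc : c = '\\'
          · subst hc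
            cases t with
            | nil => simp [escCount]
            | cons d t' =>
              have hd : d ≠ q := by
                intro hdq; subst hdq
                simp [List.isPrefixOf] at hmatch
              simp only [beq_self_eq_true]
              simpa using escCount_head_ne hd true false
          · have hcb : (c == '\\') = false := by simpa using hc
            simp [hcb]
        rw [heq]

theorem count_nonempty (cs : List Char) (c : Char) (rest : List Char) :
    PySem.Chars.count cs (c :: rest) = PySem.Chars.count.go (c :: rest) cs.length cs 0 := by
  simp [PySem.Chars.count]

theorem altLoop_eq (cs : List Char) :
    ∀ (sq dq pb : Int) (prev : Bool),
      altLoop cs sq dq pb prev =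
        (sq + (cs.count '\'' : Int) - (escCount cs '\'' prev : Int),
         dq + (cs.count '"' : Int) - (escCount cs '"' prev : Int),
         pb + (cs.count '(' : Int) - (cs.count ')' : Int)) := by
  induction cs with
  | nil => intro sq dq pb prev; simp [altLoop, escCount]
  | cons c t ih =>
    intro sq dq pb prev
    simp only [altLoop]
    by_cases h1 : (c == '\'' && !prev) = true
    · rw [if_pos h1, ih]
      simp only [Bool.and_eq_true, beq_iff_eq, Bool.not_eq_true'] at h1
      obtain ⟨hc, hp⟩ := h1
      subst hc; subst hp
      simp [escCount, List.count_cons, Prod.mk.injEq]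
      omega
    · rw [if_neg h1]
      by_cases h2 : (c == '"' && !prev) = true
      · rw [if_pos h2, ih]
        simp only [Bool.and_eq_true, beq_iff_eq, Bool.not_eq_true'] at h2
        obtain ⟨hc, hp⟩ := h2
        subst hc; subst hp
        simp [escCount, List.count_cons, Prod.mk.injEq]
        omega
      · rw [if_neg h2]
        by_cases h3 : (c == '(') = true
        · rw [if_pos h3, ih]
          rw [beq_iff_eq] at h3; subst h3
          simp [escCount, List.count_cons, Prod.mk.injEq]
          omega
        · rw [if_neg h3]
          by_cases h4 : (c == ')') = true
          · rw [if_pos h4, ih]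
            rw [beq_iff_eq] at h4; subst h4
            simp [escCount, List.count_cons, Prod.mk.injEq]
            omega
          · rw [if_neg h4, ih]
            simp only [Bool.and_eq_true, beq_iff_eq, Bool.not_eq_true',
              Bool.not_eq_true, Bool.and_eq_false_iff] at h1 h2
            rw [beq_iff_eq] at h3 h4
            simp only [escCount, List.count_cons, Prod.mk.injEq]
            have e3 : (c == '(') = false := by simpa using h3
            have e4 : (c == ')') = false := by simpa using h4
            rw [e3, e4]
            by_cases hc1 : c = '\''
            · subst hc1
              have hp : prev = true := by
                cases prev
                · simp at h1
                · rfl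
              subst hp
              simp [escCount, Prod.mk.injEq]
              omega
            · have e1 : (c == '\'') = false := by simpa using hc1
              rw [e1]
              by_cases hc2 : c = '"'
              · subst hc2
                have hp : prev = true := by
                  cases prev
                  · simp at h2
                  · rfl
                subst hp
                simp [escCount, Prod.mk.injEq]
                omega
              · have e2 : (c == '"') = false := by simpa using hc2
                rw [e2]
                simp only [Bool.and_false, Bool.false_eq_true, if_false, Nat.zero_add]
                omega

theorem tail_eq (S D P : Int) :
    (if PySem.Int.mod S 2 ≠ 0 ∨ PySem.Int.mod D 2 ≠ 0 then false
     else if P ≠ 0 then false else true)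
    = (PySem.Int.mod S 2 == 0 && PySem.Int.mod D 2 == 0 && P == 0) := by
  rw [Bool.eq_iff_iff]
  split_ifs with hA hB
  · simp only [Bool.false_eq_true, false_iff, Bool.and_eq_true, beq_iff_eq]
    tauto
  · simp only [Bool.false_eq_true, false_iff, Bool.and_eq_true, beq_iff_eq]
    tauto
  · push_neg at hA hB
    simp only [true_iff, Bool.and_eq_true, beq_iff_eq]
    tauto

theorem count_str_single (q : String) (ch : Char) (sub : String) (hsub : sub.toList = [ch]) :
    PySem.Str.count q sub = q.toList.count ch := by
  rw [PySem.Str.count_eq, hsub, count_nonempty,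
    count_go_single ch q.toList.length q.toList 0 le_rfl, Nat.zero_add]

theorem count_str_esc (q : String) (ch : Char) (hch : ch ≠ '\\') (sub : String)
    (hsub : sub.toList = ['\\', ch]) :
    PySem.Str.count q sub = escCount q.toList ch false := by
  rw [PySem.Str.count_eq, hsub, count_nonempty,
    count_go_esc ch hch q.toList.length q.toList 0 le_rfl, Nat.zero_add]

theorem is_syntactically_valid_spec : Claim_equal_is_syntactically_valid := by
  intro query _
  unfold Spec_is_syntactically_valid is_syntactically_valid is_syntactically_valid_alt
  set q := PySem.Str.lower (PySem.Str.strip query) with hqdef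
  by_cases h1 : PySem.Str.startswith q "clarification:" = true
  · simp only [h1, if_true]
  · simp only [Bool.not_eq_true] at h1
    simp only [h1, Bool.false_eq_true, if_false]
    by_cases h2 : (validStarts.any (fun start => PySem.Str.startswith q start)) = true
    · simp only [h2, Bool.not_true, Bool.false_eq_true, if_false]
      have e1 : PySem.Str.count q "'" = q.toList.count '\'' := count_str_single q '\'' _ (by decide)
      have e2 : PySem.Str.count q "\"" = q.toList.count '"' := count_str_single q '"' _ (by decide)
      have e3 : PySem.Str.count q "(" = q.toList.count '(' := count_str_single q '(' _ (by decide)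
      have e4 : PySem.Str.count q ")" = q.toList.count ')' := count_str_single q ')' _ (by decide)
      have e5 : PySem.Str.count q "\\'" = escCount q.toList '\'' false := count_str_esc q '\'' (by decide) _ (by decide)
      have e6 : PySem.Str.count q "\\\"" = escCount q.toList '"' false := count_str_esc q '"' (by decide) _ (by decide)
      rw [e1, e2, e3, e4, e5, e6, altLoop_eq]
      have hz : ∀ (n m : Nat), (0 : Int) + (n : Int) - (m : Int) = (n : Int) - (m : Int) := by
        intro n m; omega
      rw [hz, hz, hz]
      exact tail_eq _ _ _
    · simp only [Bool.not_eq_true] at h2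
      simp only [h2, Bool.not_false, if_true]
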